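-- pv_equiv track=rewrite | github.com/nameSs1/Chesss | Chess.py | bust_moves
-- ===== SOURCE A (Python) =====
-- def logic_figure_horse( x_end, y_end, x_start, y_start): # логика поведения фигры "КОНЬ"
--     if abs(x_end-x_start) == 2 and abs(y_end-y_start) == 1:
--         flag=True
--     elif abs(x_end-x_start) == 1 and abs(y_end-y_start) == 2:
--         flag=True
--     else:
--         flag=False
--     return flag
--
-- def bust_moves(x_start, y_start): #перебор ходов для фигруры
--     x_end,y_end = range(1,9),range(1,9)
--     moves=[]  # Список возможных ходов
--     for x in x_end:
--         for y in y_end: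
--             if logic_figure_horse(x, y,x_start, y_start) == True:
--                 moves.append([x, y])
--             y+=1
--         x+=1
--     return moves
-- ===== SOURCE B (Python) =====
-- def bust_moves(x_start, y_start):
--     # 8 knight offsets pre-sorted lexicographically so output matches x-then-y order
--     offsets = [(-2, -1), (-2, 1), (-1, -2), (-1, 2), (1, -2), (1, 2), (2, -1), (2, 1)]
--     return [[x_start + dx, y_start + dy] for dx, dy in offsets
--             if x_start + dx in range(1, 9) and y_start + dy in range(1, 9)]
-- ===== Notes on version B (the rewrite author's own statement) =====
-- stated objective: simpler
-- what changed: Replaces the 8x8 scan of all board squares through the knight predicate by directly generating the 8 knight-offset candidates (pre-sorted lexicographically so the order matches A's x-then-y enumeration) and keeping those on the board.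
import Mathlib
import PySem

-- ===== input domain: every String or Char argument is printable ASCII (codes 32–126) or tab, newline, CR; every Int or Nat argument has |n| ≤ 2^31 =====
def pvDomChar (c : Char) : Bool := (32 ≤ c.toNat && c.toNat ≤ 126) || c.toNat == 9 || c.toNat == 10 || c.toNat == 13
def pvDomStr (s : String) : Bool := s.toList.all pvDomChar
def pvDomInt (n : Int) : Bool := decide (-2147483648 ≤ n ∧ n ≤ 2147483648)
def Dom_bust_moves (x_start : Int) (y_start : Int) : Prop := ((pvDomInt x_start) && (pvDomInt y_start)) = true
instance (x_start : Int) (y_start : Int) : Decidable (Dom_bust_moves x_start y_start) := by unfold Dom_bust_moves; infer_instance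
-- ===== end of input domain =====

-- B replaces A's 8x8 scan of all board squares with the 8 knight-offset candidates, kept when on the board (simpler, constant-factor smaller).


-- ===== PORT A =====
def logic_figure_horse (x_end y_end x_start y_start : Int) : Bool :=
  if (x_end - x_start).natAbs = 2 ∧ (y_end - y_start).natAbs = 1 then true
  else if (x_end - x_start).natAbs = 1 ∧ (y_end - y_start).natAbs = 2 then true
  else false

def bust_moves (x_start : Int) (y_start : Int) : List (List Int) :=
  (PySem.List.pyRange 1 9 1).foldl (fun moves x =>
    (PySem.List.pyRange 1 9 1).foldl (fun moves y =>
      if logic_figure_horse x y x_start y_start = true then moves ++ [[x, y]] else moves)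
      moves) []

-- ===== PORT B =====
def bust_moves_alt (x_start : Int) (y_start : Int) : List (List Int) :=
  ([(-2, -1), (-2, 1), (-1, -2), (-1, 2), (1, -2), (1, 2), (2, -1), (2, 1)] : List (Int × Int)).foldr
    (fun d rest =>
      -- 'x_start+dx in range(1,9)': membership of an int in range(1,9) is exactly these bounds
      if (1 ≤ x_start + d.1 ∧ x_start + d.1 < 9) ∧ (1 ≤ y_start + d.2 ∧ y_start + d.2 < 9) then
        [x_start + d.1, y_start + d.2] :: rest
      else rest) []

-- ===== PRECONDITION & SPEC =====
def Spec_bust_moves (x_start : Int) (y_start : Int) (out : List (List Int)) : Prop := out = bust_moves_alt x_start y_start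
instance (x_start : Int) (y_start : Int) (out : List (List Int)) : Decidable (Spec_bust_moves x_start y_start out) := by unfold Spec_bust_moves; infer_instance

-- ===== CLAIM (what is proved, stated in full; the proofs are below) =====
def Claim_equal_bust_moves : Prop := ∀ (x_start : Int) (y_start : Int), Dom_bust_moves x_start y_start → Spec_bust_moves x_start y_start (bust_moves x_start y_start)

-- ===== LEMMAS AND PROOFS =====

-- a foldl whose step leaves the accumulator unchanged on every list element is the identity
theorem pvFoldlId {α β : Type} (g : α → β → α) (l : List β) (acc : α)
    (h : ∀ a : α, ∀ x ∈ l, g a x = a) : l.foldl g acc = acc := by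
  induction l generalizing acc with
  | nil => rfl
  | cons b t ih =>
      simp only [List.foldl_cons]
      rw [h acc b (by simp)]
      exact ih acc (fun a x hx => h a x (by simp [hx]))

theorem pvHorseFalse (x y x_start y_start : Int)
    (hx : 1 ≤ x ∧ x ≤ 8) (hy : 1 ≤ y ∧ y ≤ 8)
    (hout : (x_start < -1 ∨ 10 < x_start) ∨ (y_start < -1 ∨ 10 < y_start)) :
    logic_figure_horse x y x_start y_start = false := by
  unfold logic_figure_horse
  rw [if_neg, if_neg] <;> omega

theorem pvAEmpty (x_start y_start : Int)
    (hout : (x_start < -1 ∨ 10 < x_start) ∨ (y_start < -1 ∨ 10 < y_start)) :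
    bust_moves x_start y_start = [] := by
  unfold bust_moves
  apply pvFoldlId
  intro a x hxmem
  apply pvFoldlId
  intro a' y hymem
  rw [PySem.List.mem_pyRange_one] at hxmem hymem
  rw [pvHorseFalse x y x_start y_start (by omega) (by omega) hout]
  simp

theorem pvBEmpty (x_start y_start : Int)
    (hout : (x_start < -1 ∨ 10 < x_start) ∨ (y_start < -1 ∨ 10 < y_start)) :
    bust_moves_alt x_start y_start = [] := by
  unfold bust_moves_alt
  simp only [List.foldr]
  rw [if_neg, if_neg, if_neg, if_neg, if_neg, if_neg, if_neg, if_neg] <;> omega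

-- ===== VERDICT (by name: the statement is the Claim_ definition above) =====
theorem bust_moves_spec : Claim_equal_bust_moves := by
  intro x_start y_start _
  unfold Spec_bust_moves
  by_cases hx : -1 ≤ x_start ∧ x_start ≤ 10
  · by_cases hy : -1 ≤ y_start ∧ y_start ≤ 10
    · obtain ⟨hx1, hx2⟩ := hx
      obtain ⟨hy1, hy2⟩ := hy
      interval_cases x_start <;> interval_cases y_start <;> decide
    · rw [pvAEmpty _ _ (by omega), pvBEmpty _ _ (by omega)]
  · rw [pvAEmpty _ _ (by omega), pvBEmpty _ _ (by omega)]
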